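-- pv_equiv track=rewrite | github.com/prashanta-dev7/blog_topics | fetch_feeds.py | suggest_angle
-- ===== SOURCE A (Python) =====
-- def suggest_angle(title):
--     t = (title or "").lower()
--     if any(w in t for w in ["bridal","bride","wedding","lehenga"]):
--         return f"Bridal Edit: {title.split(':')[0].strip()} — A Complete Style Guide"
--     if any(w in t for w in ["celebrity","spotted","wore","wearing","airport","red carpet"]):
--         return "Get the Look: How to Style This Celebrity Trend the AZA Way"
--     if any(w in t for w in ["collection","launch","debut","new season"]):
--         return "Designer Spotlight: What This Collection Means for Indian Fashion"
--     if any(w in t for w in ["craft","handloom","artisan","heritage","weave","embroidery"]):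
--         return "The Craft Story: Celebrating the Hands Behind the Fabric"
--     if any(w in t for w in ["trend","forecast","season","style guide"]):
--         return "Your AZA Style Guide to This Season's Biggest Trend"
--     if any(w in t for w in ["festive","diwali","navratri","eid","holi","occasion"]):
--         return "Festive Dressing: How to Own This Occasion"
--     return f"Fashion Intelligence: {title[:70]}..."
-- ===== SOURCE B (Python) =====
-- # One full scan over a flat keyword->category map computing the MINIMUM matching
-- # category index (no per-group short-circuit checks), then a table dispatch.
-- KEYWORD_CATEGORY = [
--     ("bridal", 0), ("bride", 0), ("wedding", 0), ("lehenga", 0),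
--     ("celebrity", 1), ("spotted", 1), ("wore", 1), ("wearing", 1), ("airport", 1), ("red carpet", 1),
--     ("collection", 2), ("launch", 2), ("debut", 2), ("new season", 2),
--     ("craft", 3), ("handloom", 3), ("artisan", 3), ("heritage", 3), ("weave", 3), ("embroidery", 3),
--     ("trend", 4), ("forecast", 4), ("season", 4), ("style guide", 4),
--     ("festive", 5), ("diwali", 5), ("navratri", 5), ("eid", 5), ("holi", 5), ("occasion", 5),
-- ]
--
-- ANGLES = [
--     "",  # category 0 is formatted from the title, see below
--     "Get the Look: How to Style This Celebrity Trend the AZA Way",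
--     "Designer Spotlight: What This Collection Means for Indian Fashion",
--     "The Craft Story: Celebrating the Hands Behind the Fabric",
--     "Your AZA Style Guide to This Season's Biggest Trend",
--     "Festive Dressing: How to Own This Occasion",
-- ]
--
-- def suggest_angle(title):
--     t = (title or "").lower()
--     best = None
--     for w, i in KEYWORD_CATEGORY:
--         if w in t and (best is None or i < best):
--             best = i
--     if best is None:
--         return f"Fashion Intelligence: {title[:70]}..."
--     if best == 0:
--         return f"Bridal Edit: {title.split(':')[0].strip()} — A Complete Style Guide"
--     return ANGLES[best]
-- ===== Notes on version B (the rewrite author's own statement) =====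
-- stated objective: alternative
-- what changed: Replaced A's short-circuiting chain of six per-group any() membership checks by one full pass over a flat keyword-to-category map that folds the minimum matching category index into an accumulator, followed by a table dispatch on that index.
import Mathlib
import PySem

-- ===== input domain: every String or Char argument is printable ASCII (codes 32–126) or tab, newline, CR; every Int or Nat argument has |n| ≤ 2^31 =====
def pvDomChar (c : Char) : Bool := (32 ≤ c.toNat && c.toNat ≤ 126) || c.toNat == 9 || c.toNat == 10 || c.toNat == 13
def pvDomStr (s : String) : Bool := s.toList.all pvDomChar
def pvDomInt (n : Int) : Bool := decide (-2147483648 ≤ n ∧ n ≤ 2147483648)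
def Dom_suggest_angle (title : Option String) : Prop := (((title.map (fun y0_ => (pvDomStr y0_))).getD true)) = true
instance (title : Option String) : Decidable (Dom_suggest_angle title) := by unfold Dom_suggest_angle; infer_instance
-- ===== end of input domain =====

-- B replaces A's short-circuiting per-group checks by one full scan over a flat keyword→category
-- map folding the minimum matching category, then a table dispatch; equal return values on all non-None titles.

-- any(w in t for w in kws), shared helper
def pvCond (kws : List String) (t : String) : Bool := kws.any (fun w => PySem.Str.isIn w t)

-- ===== PORT A =====
def suggest_angle (title : Option String) : String :=
  let s := title.getD ""          -- (title or "")
  let t := PySem.Str.lower s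
  if pvCond ["bridal","bride","wedding","lehenga"] t then
    "Bridal Edit: " ++ PySem.Str.strip (((PySem.Str.split? s ":").getD []).headD "") ++ " — A Complete Style Guide"
  else if pvCond ["celebrity","spotted","wore","wearing","airport","red carpet"] t then
    "Get the Look: How to Style This Celebrity Trend the AZA Way"
  else if pvCond ["collection","launch","debut","new season"] t then
    "Designer Spotlight: What This Collection Means for Indian Fashion"
  else if pvCond ["craft","handloom","artisan","heritage","weave","embroidery"] t then
    "The Craft Story: Celebrating the Hands Behind the Fabric"
  else if pvCond ["trend","forecast","season","style guide"] t then
    "Your AZA Style Guide to This Season's Biggest Trend"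
  else if pvCond ["festive","diwali","navratri","eid","holi","occasion"] t then
    "Festive Dressing: How to Own This Occasion"
  else
    "Fashion Intelligence: " ++ PySem.Str.slice s none (some 70) ++ "..."

-- ===== PORT B =====
-- the flat keyword → category map (Python KEYWORD_CATEGORY)
def pvKeywordCategory : List (String × Nat) :=
  [("bridal", 0), ("bride", 0), ("wedding", 0), ("lehenga", 0),
   ("celebrity", 1), ("spotted", 1), ("wore", 1), ("wearing", 1), ("airport", 1), ("red carpet", 1),
   ("collection", 2), ("launch", 2), ("debut", 2), ("new season", 2),
   ("craft", 3), ("handloom", 3), ("artisan", 3), ("heritage", 3), ("weave", 3), ("embroidery", 3),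
   ("trend", 4), ("forecast", 4), ("season", 4), ("style guide", 4),
   ("festive", 5), ("diwali", 5), ("navratri", 5), ("eid", 5), ("holi", 5), ("occasion", 5)]

-- constant angles table (Python ANGLES; index 0 is a placeholder, that category is formatted from the title)
def pvAngles : List String :=
  ["",
   "Get the Look: How to Style This Celebrity Trend the AZA Way",
   "Designer Spotlight: What This Collection Means for Indian Fashion",
   "The Craft Story: Celebrating the Hands Behind the Fabric",
   "Your AZA Style Guide to This Season's Biggest Trend",
   "Festive Dressing: How to Own This Occasion"]

-- loop body: if w in t and (best is None or i < best): best = i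
def pvStep (t : String) (best : Option Nat) (p : String × Nat) : Option Nat :=
  if PySem.Str.isIn p.1 t && (match best with | none => true | some m => decide (p.2 < m)) then
    some p.2
  else best

def suggest_angle_alt (title : Option String) : String :=
  let s := title.getD ""
  let t := PySem.Str.lower s
  let best := pvKeywordCategory.foldl (pvStep t) none
  match best with
  | none => "Fashion Intelligence: " ++ PySem.Str.slice s none (some 70) ++ "..."
  | some 0 => "Bridal Edit: " ++ PySem.Str.strip (((PySem.Str.split? s ":").getD []).headD "") ++ " — A Complete Style Guide"
  | some i => (PySem.List.pyGet? pvAngles (i : Int)).getD ""  -- ANGLES[best]; best ∈ 1..5 so always in range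

-- ===== PRECONDITION & SPEC =====
-- Pre_ excludes title = None, on which both A and B raise TypeError at title[:70].
def Pre_suggest_angle (title : Option String) : Prop := title.isSome = true
instance (title : Option String) : Decidable (Pre_suggest_angle title) := by unfold Pre_suggest_angle; infer_instance
def pvWitness_suggest_angle : Option String := some "Bridal lehenga: best of 2024"

def Spec_suggest_angle (title : Option String) (out : String) : Prop := out = suggest_angle_alt title
instance (title : Option String) (out : String) : Decidable (Spec_suggest_angle title out) := by unfold Spec_suggest_angle; infer_instance

-- ===== CLAIM =====
def Claim_equal_suggest_angle : Prop := ∀ (title : Option String), Dom_suggest_angle title → Pre_suggest_angle title → Spec_suggest_angle title (suggest_angle title)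

-- ===== LEMMAS AND PROOFS =====

-- folding one keyword group (all mapped to the same category i) starting from an accumulator
-- that can only hold categories ≤ i: it stays put if set, else records i iff the group matches.
theorem pv_fold_group (t : String) (i : Nat) (ws : List String) (acc : Option Nat)
    (h : ∀ m, acc = some m → m ≤ i) :
    (ws.map (fun w => (w, i))).foldl (pvStep t) acc =
      if pvCond ws t then (if acc.isSome then acc else some i) else acc := by
  induction ws generalizing acc with
  | nil => simp [pvCond]
  | cons w ws ih =>
    have hrw : pvCond (w :: ws) t = (PySem.Str.isIn w t || pvCond ws t) := by
      simp only [pvCond, List.any_cons]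
    rw [List.map_cons, List.foldl_cons, hrw]
    cases hw : PySem.Str.isIn w t with
    | false =>
      have hstep : pvStep t acc (w, i) = acc := by unfold pvStep; rw [hw]; simp
      rw [hstep, ih acc h, Bool.false_or]
    | true =>
      cases acc with
      | none =>
        have hstep : pvStep t none (w, i) = some i := by unfold pvStep; rw [hw]; simp
        rw [hstep, ih (some i) (fun m hm => by cases hm; exact le_refl i), Bool.true_or]
        simp
      | some m =>
        have hmi : m ≤ i := h m rfl
        have hstep : pvStep t (some m) (w, i) = some m := by
          have hnm : ¬ (i < m) := by omega
          unfold pvStep; rw [hw]; simp [hnm]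
        rw [hstep, ih (some m) h, Bool.true_or]
        simp

-- folding a group from an already-set accumulator some m with m ≤ i keeps it
theorem pv_keep (t : String) (i : Nat) (ws : List String) (m : Nat) (h : m ≤ i) :
    (ws.map (fun w => (w, i))).foldl (pvStep t) (some m) = some m := by
  rw [pv_fold_group t i ws (some m) (fun k hk => by cases hk; exact h)]
  simp

-- the full fold equals the first-match category of A's priority order
theorem pv_fold_all (t : String) :
    pvKeywordCategory.foldl (pvStep t) none =
      if pvCond ["bridal","bride","wedding","lehenga"] t then some 0
      else if pvCond ["celebrity","spotted","wore","wearing","airport","red carpet"] t then some 1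
      else if pvCond ["collection","launch","debut","new season"] t then some 2
      else if pvCond ["craft","handloom","artisan","heritage","weave","embroidery"] t then some 3
      else if pvCond ["trend","forecast","season","style guide"] t then some 4
      else if pvCond ["festive","diwali","navratri","eid","holi","occasion"] t then some 5
      else none := by
  have hsplit : pvKeywordCategory =
      (["bridal","bride","wedding","lehenga"].map (fun w => (w, 0)))
      ++ (["celebrity","spotted","wore","wearing","airport","red carpet"].map (fun w => (w, 1)))
      ++ (["collection","launch","debut","new season"].map (fun w => (w, 2)))
      ++ (["craft","handloom","artisan","heritage","weave","embroidery"].map (fun w => (w, 3)))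
      ++ (["trend","forecast","season","style guide"].map (fun w => (w, 4)))
      ++ (["festive","diwali","navratri","eid","holi","occasion"].map (fun w => (w, 5))) := rfl
  rw [hsplit]
  simp only [List.foldl_append]
  rw [pv_fold_group t 0 _ none (fun m hm => by cases hm)]
  by_cases h1 : pvCond ["bridal","bride","wedding","lehenga"] t
  · simp only [h1, if_true, Option.isSome_none, Bool.false_eq_true, if_false]
    rw [pv_keep t 1 _ 0 (by omega), pv_keep t 2 _ 0 (by omega), pv_keep t 3 _ 0 (by omega),
        pv_keep t 4 _ 0 (by omega), pv_keep t 5 _ 0 (by omega)]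
  · simp only [h1, Bool.false_eq_true, if_false]
    rw [pv_fold_group t 1 _ none (fun m hm => by cases hm)]
    by_cases h2 : pvCond ["celebrity","spotted","wore","wearing","airport","red carpet"] t
    · simp only [h2, if_true, Option.isSome_none, Bool.false_eq_true, if_false]
      rw [pv_keep t 2 _ 1 (by omega), pv_keep t 3 _ 1 (by omega),
          pv_keep t 4 _ 1 (by omega), pv_keep t 5 _ 1 (by omega)]
    · simp only [h2, Bool.false_eq_true, if_false]
      rw [pv_fold_group t 2 _ none (fun m hm => by cases hm)]
      by_cases h3 : pvCond ["collection","launch","debut","new season"] t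
      · simp only [h3, if_true, Option.isSome_none, Bool.false_eq_true, if_false]
        rw [pv_keep t 3 _ 2 (by omega), pv_keep t 4 _ 2 (by omega), pv_keep t 5 _ 2 (by omega)]
      · simp only [h3, Bool.false_eq_true, if_false]
        rw [pv_fold_group t 3 _ none (fun m hm => by cases hm)]
        by_cases h4 : pvCond ["craft","handloom","artisan","heritage","weave","embroidery"] t
        · simp only [h4, if_true, Option.isSome_none, Bool.false_eq_true, if_false]
          rw [pv_keep t 4 _ 3 (by omega), pv_keep t 5 _ 3 (by omega)]
        · simp only [h4, Bool.false_eq_true, if_false]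
          rw [pv_fold_group t 4 _ none (fun m hm => by cases hm)]
          by_cases h5 : pvCond ["trend","forecast","season","style guide"] t
          · simp only [h5, if_true, Option.isSome_none, Bool.false_eq_true, if_false]
            rw [pv_keep t 5 _ 4 (by omega)]
          · simp only [h5, Bool.false_eq_true, if_false]
            rw [pv_fold_group t 5 _ none (fun m hm => by cases hm)]
            simp

-- ===== VERDICT =====
theorem suggest_angle_spec : Claim_equal_suggest_angle := by
  intro title _ _
  unfold Spec_suggest_angle suggest_angle suggest_angle_alt
  simp only [pv_fold_all]
  by_cases h1 : pvCond ["bridal","bride","wedding","lehenga"] (PySem.Str.lower (title.getD "")) <;>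
  by_cases h2 : pvCond ["celebrity","spotted","wore","wearing","airport","red carpet"] (PySem.Str.lower (title.getD "")) <;>
  by_cases h3 : pvCond ["collection","launch","debut","new season"] (PySem.Str.lower (title.getD "")) <;>
  by_cases h4 : pvCond ["craft","handloom","artisan","heritage","weave","embroidery"] (PySem.Str.lower (title.getD "")) <;>
  by_cases h5 : pvCond ["trend","forecast","season","style guide"] (PySem.Str.lower (title.getD "")) <;>
  by_cases h6 : pvCond ["festive","diwali","navratri","eid","holi","occasion"] (PySem.Str.lower (title.getD "")) <;>
  simp [h1, h2, h3, h4, h5, h6, PySem.List.pyGet?, PySem.List.pyIdx?, pvAngles]
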